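-- pv_equiv track=rewrite | github.com/yuzhang123ucsd/COGS18_Project_FA21 | my_module/functions.py | find_coprime_based_on_num
-- ===== SOURCE A (Python) =====
-- def find_gcd(x, y):
--     """
--     Description:
--     find the greatest common divisor of two numbers, by iterating from 1 to the minimum of x and y until find one
--
--     Parameters:
--         x = int, the first positive integer number
--         y = int, the second positive integer number
--
--     Return:
--         int, the greatest common divisor
--     """
--     if(x > y):
--         min = y
--     else:
--         min = x
--     for i in range(min):
--         num = i + 1
--         if((x % num == 0) and (y % num == 0)):
--             gcd = num
--
--     return gcd
--
-- def find_coprime_based_on_num(num, m):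
--     '''
--     Description:
--     Find the coprime of m based on a positive number
--
--     Paramters:
--         num = int, a positive number between 1 and m - 1
--         m = int, the size of the alphabet
--     '''
--     # look up
--     for i in range(num, m - 1):
--         if(find_gcd(i, m) == 1):
--             return i
--     # look down
--     for i in range(1, num):
--         if(find_gcd(i, m) == 1):
--             return i
--     return -1
-- ===== SOURCE B (Python) =====
-- def find_coprime_based_on_num(num, m):
--     """First coprime of m in the wrap-around candidate order (num..m-2, then 1..num-1),
--     testing coprimality with the Euclidean algorithm instead of linear trial division."""
--     def gcd(a, b):
--         while b:
--             a, b = b, a % b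
--         return a
--     return next((i for r in (range(num, m - 1), range(1, num)) for i in r if gcd(i, m) == 1), -1)
-- ===== Notes on version B (the rewrite author's own statement) =====
-- stated objective: faster
-- what changed: B replaces A's linear trial-division gcd (a full 1..min(i,m) scan per candidate) with the Euclidean algorithm, and scans the two candidate ranges as one lazy chained generator with next(..., -1) instead of two loops of nested scans.
import Mathlib
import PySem

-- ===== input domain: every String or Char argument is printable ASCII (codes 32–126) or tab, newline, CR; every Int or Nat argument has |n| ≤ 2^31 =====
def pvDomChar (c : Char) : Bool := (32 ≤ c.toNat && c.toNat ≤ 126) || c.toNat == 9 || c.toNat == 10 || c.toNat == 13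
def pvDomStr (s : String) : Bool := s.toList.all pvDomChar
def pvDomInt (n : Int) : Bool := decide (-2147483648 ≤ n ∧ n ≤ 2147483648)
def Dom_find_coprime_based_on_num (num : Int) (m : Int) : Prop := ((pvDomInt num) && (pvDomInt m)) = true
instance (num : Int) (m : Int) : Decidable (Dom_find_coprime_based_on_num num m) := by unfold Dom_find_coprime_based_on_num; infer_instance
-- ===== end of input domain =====

-- B replaces A's linear trial-division gcd with the Euclidean algorithm and scans the two
-- candidate ranges as one concatenated sequence (objective: faster, asymptotically).

-- ===== PORT A =====
-- find_gcd(x, y): trial division from 1 to min(x, y), remembering the last common divisor.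
-- The accumulator is Option Int: `none` models Python's unassigned `gcd` (NameError on return).
def find_gcd (x y : Int) : Option Int :=
  let mn : Int := if x > y then y else x
  (PySem.List.pyRange 0 mn 1).foldl
    (fun acc i =>
      if PySem.Int.mod x (i + 1) = 0 ∧ PySem.Int.mod y (i + 1) = 0 then some (i + 1) else acc)
    none

-- a `for i in range(a, b)` loop with early return, kept lazy like Python's range:
-- the fuel is the range length, so `0` fuel is exactly the exhausted loop
def loopA (fuel : Nat) (i m : Int) : Option Int :=
  match fuel with
  | 0 => none
  | f + 1 => if find_gcd i m == some 1 then some i else loopA f (i + 1) m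

def find_coprime_based_on_num (num : Int) (m : Int) : Int :=
  match loopA (m - 1 - num).toNat num m with          -- look up
  | some i => i
  | none =>
    match loopA (num - 1).toNat 1 m with              -- look down
    | some i => i
    | none => -1

-- ===== PORT B =====
-- Euclidean gcd: `while b: a, b = b, a % b`; the fuel (|b|+1) only makes the loop total —
-- |b| strictly decreases each iteration, so the fuel is never exhausted.
def euclidAux (fuel : Nat) (a b : Int) : Int :=
  match fuel with
  | 0 => a
  | fuel + 1 => if b = 0 then a else euclidAux fuel b (PySem.Int.mod a b)

def euclid_gcd (a b : Int) : Int := euclidAux (b.natAbs + 1) a b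

-- the chained generator: scan the first range, then the second, first hit wins, default -1
def altLoop (fuel : Nat) (i m : Int) : Option Int :=
  match fuel with
  | 0 => none
  | f + 1 => if euclid_gcd i m == 1 then some i else altLoop f (i + 1) m

def find_coprime_based_on_num_alt (num : Int) (m : Int) : Int :=
  ((altLoop (m - 1 - num).toNat num m).or (altLoop (num - 1).toNat 1 m)).getD (-1)

-- ===== PRECONDITION & SPEC =====
-- A raises NameError/UnboundLocalError exactly when some tested candidate i has min(i, m) ≤ 0,
-- i.e. num ≤ 0 with num ≤ m - 2, or m ≤ 0 with num ≥ 2; Pre_ excludes exactly those inputs.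
def Pre_find_coprime_based_on_num (num : Int) (m : Int) : Prop :=
  ¬((num ≤ 0 ∧ num + 2 ≤ m) ∨ (m ≤ 0 ∧ 2 ≤ num))
instance (num : Int) (m : Int) : Decidable (Pre_find_coprime_based_on_num num m) := by
  unfold Pre_find_coprime_based_on_num; infer_instance

def pvWitness_find_coprime_based_on_num : Int × Int := (2, 10)

def Spec_find_coprime_based_on_num (num : Int) (m : Int) (out : Int) : Prop :=
  out = find_coprime_based_on_num_alt num m
instance (num : Int) (m : Int) (out : Int) : Decidable (Spec_find_coprime_based_on_num num m out) := by
  unfold Spec_find_coprime_based_on_num; infer_instance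

-- ===== CLAIM (what is proved, stated in full; the proofs are below) =====
def Claim_equal_find_coprime_based_on_num : Prop := ∀ (num : Int) (m : Int), Dom_find_coprime_based_on_num num m → Pre_find_coprime_based_on_num num m → Spec_find_coprime_based_on_num num m (find_coprime_based_on_num num m)

-- ===== LEMMAS AND PROOFS =====

-- B's fueled Euclid computes Int.gcd on nonnegative inputs
lemma euclidAux_eq_gcd (fuel : Nat) : ∀ (a b : Int), 0 ≤ a → 0 ≤ b → b.natAbs < fuel →
    euclidAux fuel a b = (Int.gcd a b : Int) := by
  induction fuel with
  | zero => intro a b _ _ h; exact absurd h (Nat.not_lt_zero _)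
  | succ n ih =>
    intro a b ha hb hlt
    simp only [euclidAux]
    split_ifs with h0
    · subst h0
      simp [Int.gcd, Int.natAbs_of_nonneg ha]
    · have hbpos : 0 < b := lt_of_le_of_ne hb (Ne.symm h0)
      rw [PySem.Int.mod_eq_emod_of_pos hbpos]
      have h1 : 0 ≤ a % b := Int.emod_nonneg a (ne_of_gt hbpos)
      have h2 : a % b < b := Int.emod_lt_of_pos a hbpos
      rw [ih b (a % b) hb h1 (by omega)]
      have hm : (a % b : Int) = ((a.natAbs % b.natAbs : Nat) : Int) := by
        conv_lhs => rw [← Int.natAbs_of_nonneg ha, ← Int.natAbs_of_nonneg hb]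
        norm_cast
      rw [hm]
      congr 1
      conv_lhs => rw [← Int.natAbs_of_nonneg hb]
      conv_rhs => rw [← Int.natAbs_of_nonneg ha, ← Int.natAbs_of_nonneg hb]
      rw [Int.gcd_natCast_natCast, Int.gcd_natCast_natCast, Nat.gcd_comm b.natAbs]
      simp only [Int.natAbs_natCast]
      rw [← Nat.gcd_rec]
      exact Nat.gcd_comm _ _

lemma euclid_gcd_eq (a b : Int) (ha : 0 ≤ a) (hb : 0 ≤ b) :
    euclid_gcd a b = (Int.gcd a b : Int) :=
  euclidAux_eq_gcd _ a b ha hb (Nat.lt_succ_self _)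

-- A's trial-division loop also computes Int.gcd on positive inputs
lemma find_gcd_eq (x y : Int) (hx : 1 ≤ x) (hy : 1 ≤ y) :
    find_gcd x y = some (Int.gcd x y : Int) := by
  set g : Int := (Int.gcd x y : Int) with hg
  have hgpos : 1 ≤ g := by
    have : Int.gcd x y ≠ 0 := by
      simp [Int.gcd_eq_zero_iff]
      omega
    omega
  have hdx : g ∣ x := by rw [hg]; exact Int.gcd_dvd_left x y
  have hdy : g ∣ y := by rw [hg]; exact Int.gcd_dvd_right x y
  have hgx : g ≤ x := Int.le_of_dvd (by omega) hdx
  have hgy : g ≤ y := Int.le_of_dvd (by omega) hdy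
  simp only [find_gcd]
  set f : Option Int → Int → Option Int := fun acc i =>
    if PySem.Int.mod x (i + 1) = 0 ∧ PySem.Int.mod y (i + 1) = 0 then some (i + 1) else acc
    with hf
  set mn : Int := if x > y then y else x with hmn
  have hgmn : g ≤ mn := by
    rw [hmn]; split_ifs <;> omega
  rw [PySem.List.pyRange_one_append 0 g mn (by omega) hgmn, List.foldl_append]
  -- no candidate divisor above g is a common divisor
  have htail : ∀ (acc : Option Int), ∀ i ∈ PySem.List.pyRange g mn 1, f acc i = acc := by
    intro acc i hi
    obtain ⟨hgi, _⟩ := (PySem.List.mem_pyRange_one).1 hi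
    simp only [hf]
    rw [if_neg]
    rintro ⟨hdx1, hdy1⟩
    rw [PySem.Int.mod_eq_zero_iff_dvd] at hdx1 hdy1
    have hdg : (i + 1) ∣ g := by
      rw [hg]
      have hn : (i + 1).natAbs ∣ Int.gcd x y :=
        Nat.dvd_gcd (Int.natAbs_dvd_natAbs.mpr hdx1) (Int.natAbs_dvd_natAbs.mpr hdy1)
      have hcast := Int.natCast_dvd_natCast.mpr hn
      rwa [Int.natAbs_of_nonneg (by omega : (0:Int) ≤ i + 1)] at hcast
    have := Int.le_of_dvd (by omega) hdg
    omega
  rw [PySem.List.foldl_congr_mem _ f (fun acc _ => acc) _ htail, PySem.List.foldl_ignore]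
  -- the head [0, g) ends with i = g - 1, whose divisor g divides both x and y
  rw [PySem.List.pyRange_one_append 0 (g - 1) g (by omega) (by omega), List.foldl_append]
  have hg1 : g - 1 + 1 = g := by ring
  rw [PySem.List.pyRange_one_cons (by omega : g - 1 < g), hg1,
      PySem.List.pyRange_one_eq_nil (le_refl g)]
  simp only [List.foldl_cons, List.foldl_nil, hf]
  rw [hg1, if_pos]
  constructor <;> rw [PySem.Int.mod_eq_zero_iff_dvd]
  · exact hdx
  · exact hdy

-- the two candidate tests agree on positive candidates
lemma pred_eq (i m : Int) (hi : 1 ≤ i) (hm : 1 ≤ m) :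
    (find_gcd i m == some 1) = (euclid_gcd i m == 1) := by
  rw [find_gcd_eq i m hi hm, euclid_gcd_eq i m (by omega) (by omega)]
  rfl

lemma loopA_eq_find? (n : Nat) : ∀ (i stop m : Int), (stop - i).toNat = n →
    loopA n i m = (PySem.List.pyRange i stop 1).find? (fun j => find_gcd j m == some 1) := by
  induction n with
  | zero =>
    intro i stop m h
    rw [PySem.List.pyRange_one_eq_nil (by omega)]
    rfl
  | succ k ih =>
    intro i stop m h
    rw [PySem.List.pyRange_one_cons (by omega)]
    simp only [loopA, List.find?_cons]
    cases hp : (find_gcd i m == some 1) with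
    | true => simp
    | false => simp; exact ih (i + 1) stop m (by omega)

lemma altLoop_eq_find? (n : Nat) : ∀ (i stop m : Int), (stop - i).toNat = n →
    altLoop n i m = (PySem.List.pyRange i stop 1).find? (fun j => euclid_gcd j m == 1) := by
  induction n with
  | zero =>
    intro i stop m h
    rw [PySem.List.pyRange_one_eq_nil (by omega)]
    rfl
  | succ k ih =>
    intro i stop m h
    rw [PySem.List.pyRange_one_cons (by omega)]
    simp only [altLoop, List.find?_cons]
    cases hp : (euclid_gcd i m == 1) with
    | true => simp
    | false => simp; exact ih (i + 1) stop m (by omega)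

lemma find?_congr_mem {α : Type} (l : List α) (p q : α → Bool)
    (h : ∀ x ∈ l, p x = q x) : l.find? p = l.find? q := by
  induction l with
  | nil => rfl
  | cons x t ih =>
    have hx := h x (List.mem_cons_self)
    rw [List.find?_cons, List.find?_cons, hx, ih (fun y hy => h y (List.mem_cons_of_mem x hy))]

-- ===== VERDICT (by name: the statement is the Claim_ definition above) =====
theorem find_coprime_based_on_num_spec : Claim_equal_find_coprime_based_on_num := by
  intro num m _ hpre
  unfold Spec_find_coprime_based_on_num
  unfold Pre_find_coprime_based_on_num at hpre
  unfold find_coprime_based_on_num find_coprime_based_on_num_alt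
  rw [loopA_eq_find? _ num (m - 1) m rfl, loopA_eq_find? _ 1 num m rfl,
      altLoop_eq_find? _ num (m - 1) m rfl, altLoop_eq_find? _ 1 num m rfl]
  by_cases hmain : 1 ≤ num ∧ 1 ≤ m
  · obtain ⟨h1, h2⟩ := hmain
    rw [find?_congr_mem (PySem.List.pyRange num (m - 1) 1)
        (fun i => find_gcd i m == some 1) (fun i => euclid_gcd i m == 1)
        (fun i hi => pred_eq i m (by
          obtain ⟨hni, _⟩ := (PySem.List.mem_pyRange_one).1 hi; omega) h2)]
    rw [find?_congr_mem (PySem.List.pyRange 1 num 1)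
        (fun i => find_gcd i m == some 1) (fun i => euclid_gcd i m == 1)
        (fun i hi => pred_eq i m (by
          obtain ⟨hni, _⟩ := (PySem.List.mem_pyRange_one).1 hi; omega) h2)]
    cases (PySem.List.pyRange num (m - 1) 1).find? (fun i => euclid_gcd i m == 1) with
    | some i => rfl
    | none =>
      cases (PySem.List.pyRange 1 num 1).find? (fun i => euclid_gcd i m == 1) with
      | some i => rfl
      | none => rfl
  · have hempty : m - 1 ≤ num := by omega
    rw [PySem.List.pyRange_one_eq_nil hempty, PySem.List.pyRange_one_eq_nil (by omega : num ≤ 1)]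
    rfl
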